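-- pv_equiv track=rewrite | github.com/Pedro-CAB/IA-Project | game.py | markSpots
-- ===== SOURCE A (Python) =====
-- def markSpots(board,spots):
--     x = y = 0
--     markedBoard = []
--     for line in board:
--         newLine = []
--         for spot in line:
--             if (x,y) in spots:
--                 spot = 'X'
--             newLine.append(spot)
--             x += 1
--         markedBoard.append(newLine)
--         x = 0
--         y += 1
--     return markedBoard
-- ===== SOURCE B (Python) =====
-- def markSpots(board, spots):
--     markedBoard = [list(line) for line in board]
--     for (x, y) in spots:
--         if 0 <= y < len(markedBoard) and 0 <= x < len(markedBoard[y]):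
--             markedBoard[y][x] = 'X'
--     return markedBoard
-- ===== Notes on version B (the rewrite author's own statement) =====
-- stated objective: faster
-- what changed: B copies the board once and scatters 'X' only at the given (in-bounds) spot coordinates, instead of scanning every cell and testing membership in spots.
import Mathlib
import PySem

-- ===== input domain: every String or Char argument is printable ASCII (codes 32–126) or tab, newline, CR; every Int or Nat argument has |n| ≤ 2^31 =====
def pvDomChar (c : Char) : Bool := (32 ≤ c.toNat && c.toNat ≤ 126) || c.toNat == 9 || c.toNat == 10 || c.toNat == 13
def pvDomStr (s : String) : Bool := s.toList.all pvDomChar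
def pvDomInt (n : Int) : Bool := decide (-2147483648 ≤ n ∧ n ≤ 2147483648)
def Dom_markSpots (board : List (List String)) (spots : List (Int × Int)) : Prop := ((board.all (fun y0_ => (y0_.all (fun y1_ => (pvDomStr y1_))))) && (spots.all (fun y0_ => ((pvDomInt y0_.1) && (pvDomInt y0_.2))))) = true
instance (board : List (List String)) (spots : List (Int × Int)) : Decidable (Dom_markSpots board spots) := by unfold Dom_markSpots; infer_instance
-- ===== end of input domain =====

-- B copies the board once and writes 'X' only at the in-bounds spot coordinates,
-- instead of scanning every cell and testing membership in spots.

-- ===== PORT A =====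
def markSpots (board : List (List String)) (spots : List (Int × Int)) : List (List String) :=
  (board.foldl
    (fun (st : List (List String) × Int × Int) line =>
      let inner := line.foldl
        (fun (st2 : List String × Int) spot =>
          (st2.1 ++ [if (st2.2, st.2.2) ∈ spots then "X" else spot], st2.2 + 1))
        ([], st.2.1)
      (st.1 ++ [inner.1], 0, st.2.2 + 1))
    ([], 0, 0)).1

-- ===== PORT B =====
-- one in-place marking step of Source B's loop over spots
def pvStep (mb : List (List String)) (xy : Int × Int) : List (List String) :=
  if 0 ≤ xy.2 ∧ xy.2 < (mb.length : Int) ∧ 0 ≤ xy.1 ∧ xy.1 < ((mb.getD xy.2.toNat []).length : Int)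
  then mb.set xy.2.toNat ((mb.getD xy.2.toNat []).set xy.1.toNat "X")
  else mb

def markSpots_alt (board : List (List String)) (spots : List (Int × Int)) : List (List String) :=
  spots.foldl pvStep (board.map (fun line => line.map (fun s => s)))

-- ===== PRECONDITION & SPEC =====
def Spec_markSpots (board : List (List String)) (spots : List (Int × Int)) (out : List (List String)) : Prop := out = markSpots_alt board spots
instance (board : List (List String)) (spots : List (Int × Int)) (out : List (List String)) : Decidable (Spec_markSpots board spots out) := by unfold Spec_markSpots; infer_instance

-- ===== CLAIM (what is proved, stated in full; the proofs are below) =====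
def Claim_equal_markSpots : Prop := ∀ (board : List (List String)) (spots : List (Int × Int)), Dom_markSpots board spots → Spec_markSpots board spots (markSpots board spots)

-- ===== LEMMAS AND PROOFS =====

-- common characterisation: cell (x, y) is 'X' iff (x, y) ∈ S
def pvMarkRow (S : List (Int × Int)) (y : Int) : Int → List String → List String
  | _, [] => []
  | x, s :: t => (if (x, y) ∈ S then "X" else s) :: pvMarkRow S y (x + 1) t

def pvMark (S : List (Int × Int)) : Int → List (List String) → List (List String)
  | _, [] => []
  | y, l :: t => pvMarkRow S y 0 l :: pvMark S (y + 1) t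

-- named forms of the two fold bodies in the port of A (definitionally equal to the lambdas)
def pvInnerF (spots : List (Int × Int)) (y : Int) : List String × Int → String → List String × Int :=
  fun st2 spot => (st2.1 ++ [if (st2.2, y) ∈ spots then "X" else spot], st2.2 + 1)

def pvOuterF (spots : List (Int × Int)) :
    List (List String) × Int × Int → List String → List (List String) × Int × Int :=
  fun st line => (st.1 ++ [(line.foldl (pvInnerF spots st.2.2) ([], st.2.1)).1], 0, st.2.2 + 1)

theorem pvMarkRow_length (S : List (Int × Int)) (y : Int) (l : List String) :
    ∀ x, (pvMarkRow S y x l).length = l.length := by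
  induction l with
  | nil => intro x; simp [pvMarkRow]
  | cons s t ih => intro x; simp [pvMarkRow, ih]

theorem pvMark_length (S : List (Int × Int)) (b : List (List String)) :
    ∀ y, (pvMark S y b).length = b.length := by
  induction b with
  | nil => intro y; simp [pvMark]
  | cons l t ih => intro y; simp [pvMark, ih]

theorem pvMarkRow_get (S : List (Int × Int)) (y : Int) (l : List String) :
    ∀ x i (h : i < l.length),
      (pvMarkRow S y x l)[i]'(by rw [pvMarkRow_length]; exact h)
        = if (x + (i : Int), y) ∈ S then "X" else l[i] := by
  induction l with
  | nil => intro x i h; simp at h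
  | cons s t ih =>
      intro x i h
      cases i with
      | zero => simp [pvMarkRow]
      | succ i =>
          have hrec := ih (x + 1) i (by simpa using Nat.lt_of_succ_lt_succ h)
          simp only [pvMarkRow, List.getElem_cons_succ]
          rw [hrec]
          have hx : x + ((i : Int) + 1) = x + 1 + (i : Int) := by ring
          simp [hx]

theorem pvMark_get (S : List (Int × Int)) (b : List (List String)) :
    ∀ y j (h : j < b.length),
      (pvMark S y b)[j]'(by rw [pvMark_length]; exact h)
        = pvMarkRow S (y + (j : Int)) 0 b[j] := by
  induction b with
  | nil => intro y j h; simp at h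
  | cons l t ih =>
      intro y j h
      cases j with
      | zero => simp [pvMark]
      | succ j =>
          have hrec := ih (y + 1) j (by simpa using Nat.lt_of_succ_lt_succ h)
          simp only [pvMark, List.getElem_cons_succ]
          rw [hrec]
          have hy : y + ((j : Int) + 1) = y + 1 + (j : Int) := by ring
          simp [hy]

theorem pvStep_mark (S : List (Int × Int)) (b : List (List String)) (p : Int × Int) :
    pvStep (pvMark S 0 b) p = pvMark (p :: S) 0 b := by
  unfold pvStep
  split_ifs with h
  · -- in bounds: the set writes exactly the one newly-marked cell
    obtain ⟨hy0, hylen, hx0, hxlen⟩ := h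
    rw [pvMark_length] at hylen
    have hj : p.2.toNat < b.length := by omega
    have hrow : (pvMark S 0 b).getD p.2.toNat [] = pvMarkRow S (0 + (p.2.toNat : Int)) 0 b[p.2.toNat] := by
      rw [List.getD_eq_getElem _ _ (by rw [pvMark_length]; exact hj)]
      exact pvMark_get S b 0 p.2.toNat hj
    have hxlen' : p.1.toNat < (b[p.2.toNat]).length := by
      rw [hrow, pvMarkRow_length] at hxlen; omega
    apply List.ext_getElem
    · simp [pvMark_length]
    · intro k hk1 hk2
      rw [pvMark_length] at hk2
      rw [List.getElem_set, pvMark_get S b 0 k hk2, pvMark_get (p :: S) b 0 k hk2]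
      by_cases hkj : p.2.toNat = k
      · rw [if_pos hkj]
        subst hkj
        rw [hrow]
        apply List.ext_getElem
        · rw [List.length_set, pvMarkRow_length, pvMarkRow_length]
        · intro i hi1 hi2
          rw [pvMarkRow_length] at hi2
          rw [List.getElem_set, pvMarkRow_get S _ _ _ i hi2, pvMarkRow_get (p :: S) _ _ _ i hi2]
          simp only [zero_add, List.mem_cons]
          rw [show ((p.2.toNat : Nat) : Int) = p.2 from by omega]
          by_cases hix : p.1.toNat = i
          · rw [if_pos hix]
            have hp : ((i : Int), p.2) = p := by
              cases p with
              | mk a c => rw [Prod.mk.injEq]; constructor <;> omega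
            rw [if_pos (Or.inl hp)]
          · rw [if_neg hix]
            have hne : ((i : Int), p.2) ≠ p := by
              cases p with
              | mk a c =>
                rw [Ne, Prod.mk.injEq, not_and]
                intro h1; exfalso; omega
            simp [hne]
      · rw [if_neg hkj]
        apply List.ext_getElem
        · rw [pvMarkRow_length, pvMarkRow_length]
        · intro i hi1 hi2
          rw [pvMarkRow_length] at hi2
          rw [pvMarkRow_get S _ _ _ i hi2, pvMarkRow_get (p :: S) _ _ _ i hi2]
          simp only [zero_add, List.mem_cons]
          have hne : ((i : Int), (k : Int)) ≠ p := by
            cases p with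
            | mk a c =>
              rw [Ne, Prod.mk.injEq, not_and]
              intro h1 h2; exact hkj (by omega)
          simp [hne]
  · -- out of bounds: the spot hits no cell, so the new membership never fires
    apply List.ext_getElem
    · rw [pvMark_length, pvMark_length]
    · intro k hk1 hk2
      rw [pvMark_length] at hk1
      rw [pvMark_get S b 0 k hk1, pvMark_get (p :: S) b 0 k hk1]
      apply List.ext_getElem
      · rw [pvMarkRow_length, pvMarkRow_length]
      · intro i hi1 hi2
        rw [pvMarkRow_length] at hi2
        rw [pvMarkRow_get S _ _ _ i hi2, pvMarkRow_get (p :: S) _ _ _ i hi2]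
        simp only [zero_add, List.mem_cons]
        have hne : ((i : Int), (k : Int)) ≠ p := by
          cases p with
          | mk a c =>
            intro heq
            rw [Prod.mk.injEq] at heq
            obtain ⟨ha, hc⟩ := heq
            apply h
            refine ⟨by omega, by rw [pvMark_length]; omega, by omega, ?_⟩
            have hck : c.toNat = k := by omega
            rw [hck, List.getD_eq_getElem _ _ (by rw [pvMark_length]; exact hk1),
              pvMark_get S b 0 k hk1, pvMarkRow_length]
            omega
        simp [hne]

theorem pvFold_mark (b : List (List String)) (spots : List (Int × Int)) :
    ∀ S, spots.foldl pvStep (pvMark S 0 b) = pvMark (spots.reverse ++ S) 0 b := by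
  induction spots with
  | nil => intro S; simp
  | cons p t ih =>
      intro S
      simp only [List.foldl_cons, pvStep_mark, List.reverse_cons]
      rw [ih (p :: S)]
      simp

theorem pvMarkRow_congr (S S' : List (Int × Int)) (hSS : ∀ q, q ∈ S ↔ q ∈ S') (y : Int)
    (l : List String) : ∀ x, pvMarkRow S y x l = pvMarkRow S' y x l := by
  induction l with
  | nil => intro x; rfl
  | cons s t ih => intro x; simp [pvMarkRow, ih, hSS]

theorem pvMark_congr (S S' : List (Int × Int)) (hSS : ∀ q, q ∈ S ↔ q ∈ S')
    (b : List (List String)) : ∀ y, pvMark S y b = pvMark S' y b := by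
  induction b with
  | nil => intro y; rfl
  | cons l t ih =>
      intro y
      simp only [pvMark, ih]
      rw [pvMarkRow_congr S S' hSS]

theorem pvMarkRow_nil (y : Int) (l : List String) : ∀ x, pvMarkRow [] y x l = l := by
  induction l with
  | nil => intro x; rfl
  | cons s t ih => intro x; simp [pvMarkRow, ih]

theorem pvMark_nil (b : List (List String)) : ∀ y, pvMark [] y b = b := by
  induction b with
  | nil => intro y; rfl
  | cons l t ih => intro y; simp [pvMark, ih, pvMarkRow_nil]

theorem pvRowA (spots : List (Int × Int)) (y : Int) (l : List String) :
    ∀ (acc : List String) (x : Int),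
      l.foldl (pvInnerF spots y) (acc, x) = (acc ++ pvMarkRow spots y x l, x + l.length) := by
  induction l with
  | nil => intro acc x; simp [pvMarkRow]
  | cons s t ih =>
      intro acc x
      rw [List.foldl_cons]
      show List.foldl (pvInnerF spots y)
        (acc ++ [if (x, y) ∈ spots then "X" else s], x + 1) t = _
      rw [ih]
      rw [Prod.mk.injEq]
      constructor
      · simp [pvMarkRow]
      · simp only [List.length_cons]; push_cast; ring

theorem pvA_mark (spots : List (Int × Int)) (b : List (List String)) :
    ∀ (acc : List (List String)) (y : Int),
      b.foldl (pvOuterF spots) (acc, 0, y) = (acc ++ pvMark spots y b, 0, y + (b.length : Int)) := by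
  induction b with
  | nil => intro acc y; simp [pvMark]
  | cons l t ih =>
      intro acc y
      rw [List.foldl_cons]
      have hstep : pvOuterF spots (acc, 0, y) l = (acc ++ [pvMarkRow spots y 0 l], 0, y + 1) := by
        unfold pvOuterF
        rw [pvRowA]
        simp
      rw [hstep, ih]
      refine Prod.ext ?_ (Prod.ext rfl ?_)
      · simp [pvMark]
      · simp only [List.length_cons]; push_cast; ring

theorem markSpots_eq_mark (board : List (List String)) (spots : List (Int × Int)) :
    markSpots board spots = pvMark spots 0 board := by
  have hdef : markSpots board spots = (board.foldl (pvOuterF spots) ([], 0, 0)).1 := rfl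
  rw [hdef, pvA_mark]
  simp

theorem markSpots_alt_eq_mark (board : List (List String)) (spots : List (Int × Int)) :
    markSpots_alt board spots = pvMark spots 0 board := by
  unfold markSpots_alt
  have hcopy : board.map (fun line => line.map (fun s => s)) = board := by simp
  rw [hcopy]
  calc spots.foldl pvStep board
      = spots.foldl pvStep (pvMark [] 0 board) := by rw [pvMark_nil]
    _ = pvMark (spots.reverse ++ []) 0 board := pvFold_mark board spots []
    _ = pvMark spots 0 board := pvMark_congr (spots.reverse ++ []) spots (fun q => by simp) board 0

-- ===== VERDICT (by name: the statement is the Claim_ definition above) =====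
theorem markSpots_spec : Claim_equal_markSpots := by
  intro board spots _
  unfold Spec_markSpots
  rw [markSpots_eq_mark, markSpots_alt_eq_mark]
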